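-- pv_equiv track=rewrite | github.com/OnDefend/Dyna-Defcon-33 | core/unified_analysis_managers/static_manager.py | _calculate_source_risk
-- ===== SOURCE A (Python) =====
-- from typing import Dict, Any, Optional, List, Tuple, Union
--
-- def _calculate_source_risk(findings: List[Dict]) -> str:
--     """Calculate risk level based on source findings."""
--     critical_count = sum(1 for f in findings if f.get("severity") == "CRITICAL")
--     high_count = sum(1 for f in findings if f.get("severity") == "HIGH")
--     medium_count = sum(1 for f in findings if f.get("severity") == "MEDIUM")
--
--     if critical_count > 0:
--         return "CRITICAL"
--     elif high_count > 5:
--         return "HIGH"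
--     elif high_count > 0 or medium_count > 10:
--         return "MEDIUM"
--     else:
--         return "LOW"
-- ===== SOURCE B (Python) =====
-- def _calculate_source_risk(findings):
--     """Calculate risk level based on source findings."""
--     high = 0
--     medium = 0
--     for f in findings:
--         s = f.get("severity")
--         if s == "CRITICAL":
--             return "CRITICAL"
--         elif s == "HIGH":
--             high += 1
--         elif s == "MEDIUM":
--             medium += 1
--     if high > 5:
--         return "HIGH"
--     if high > 0 or medium > 10:
--         return "MEDIUM"
--     return "LOW"
-- ===== Notes on version B (the rewrite author's own statement) =====
-- stated objective: alternative
-- what changed: Replaces three independent sum(...) scans plus a threshold cascade with a single pass that tallies HIGH/MEDIUM counts and returns CRITICAL immediately on the first critical finding.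
import Mathlib
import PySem

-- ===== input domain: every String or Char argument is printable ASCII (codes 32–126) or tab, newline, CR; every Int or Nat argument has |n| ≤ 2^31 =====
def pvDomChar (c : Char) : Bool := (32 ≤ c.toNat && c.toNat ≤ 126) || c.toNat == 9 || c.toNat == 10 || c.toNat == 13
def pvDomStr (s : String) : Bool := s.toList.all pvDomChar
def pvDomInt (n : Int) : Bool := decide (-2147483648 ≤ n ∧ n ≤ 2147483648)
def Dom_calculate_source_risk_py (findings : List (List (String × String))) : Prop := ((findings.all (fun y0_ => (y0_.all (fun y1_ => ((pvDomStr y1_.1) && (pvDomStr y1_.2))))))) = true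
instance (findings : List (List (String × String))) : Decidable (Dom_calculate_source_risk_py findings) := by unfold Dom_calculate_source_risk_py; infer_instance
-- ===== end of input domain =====

-- B replaces A's three sum(...) scans with one tally pass that exits early on the first CRITICAL finding (alternative decomposition, same cost).


-- ===== PORT A =====
-- f.get("severity") on the dict f (assoc list, first match)
def pvSev (f : List (String × String)) : Option String := (PySem.Dict.mk f).get? "severity"

def calculate_source_risk_py (findings : List (List (String × String))) : String :=
  let critical_count : Int := findings.foldl (fun acc f => if pvSev f = some "CRITICAL" then acc + 1 else acc) 0
  let high_count : Int := findings.foldl (fun acc f => if pvSev f = some "HIGH" then acc + 1 else acc) 0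
  let medium_count : Int := findings.foldl (fun acc f => if pvSev f = some "MEDIUM" then acc + 1 else acc) 0
  if critical_count > 0 then "CRITICAL"
  else if high_count > 5 then "HIGH"
  else if high_count > 0 ∨ medium_count > 10 then "MEDIUM"
  else "LOW"

-- ===== PORT B =====
def pvAltLoop : List (List (String × String)) → Int → Int → String
  | [], high, medium =>
      if high > 5 then "HIGH"
      else if high > 0 ∨ medium > 10 then "MEDIUM"
      else "LOW"
  | f :: rest, high, medium =>
      let s := pvSev f
      if s = some "CRITICAL" then "CRITICAL"
      else if s = some "HIGH" then pvAltLoop rest (high + 1) medium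
      else if s = some "MEDIUM" then pvAltLoop rest high (medium + 1)
      else pvAltLoop rest high medium

def calculate_source_risk_py_alt (findings : List (List (String × String))) : String :=
  pvAltLoop findings 0 0

-- ===== PRECONDITION & SPEC =====
def Spec_calculate_source_risk_py (findings : List (List (String × String))) (out : String) : Prop := out = calculate_source_risk_py_alt findings
instance (findings : List (List (String × String))) (out : String) : Decidable (Spec_calculate_source_risk_py findings out) := by unfold Spec_calculate_source_risk_py; infer_instance

-- ===== CLAIM (what is proved, stated in full; the proofs are below) =====
def Claim_equal_calculate_source_risk_py : Prop := ∀ (findings : List (List (String × String))), Dom_calculate_source_risk_py findings → Spec_calculate_source_risk_py findings (calculate_source_risk_py findings)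

-- ===== LEMMAS AND PROOFS =====
def pvCnt (sev : String) (fs : List (List (String × String))) : Int :=
  fs.foldl (fun acc f => if pvSev f = some sev then acc + 1 else acc) 0

theorem pvCnt_shift (sev : String) (fs : List (List (String × String))) (n : Int) :
    fs.foldl (fun acc f => if pvSev f = some sev then acc + 1 else acc) n = n + pvCnt sev fs := by
  induction fs generalizing n with
  | nil => simp [pvCnt]
  | cons f rest ih =>
      rw [List.foldl_cons, ih]
      have h2 : pvCnt sev (f :: rest) =
          (if pvSev f = some sev then (0:Int) + 1 else 0) + pvCnt sev rest := by
        rw [show pvCnt sev (f :: rest) = List.foldl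
              (fun acc g => if pvSev g = some sev then acc + 1 else acc)
              (if pvSev f = some sev then (0:Int) + 1 else 0) rest from rfl, ih]
      rw [h2]
      split <;> ring

theorem pvCnt_cons (sev : String) (f : List (String × String)) (fs : List (List (String × String))) :
    pvCnt sev (f :: fs) = (if pvSev f = some sev then 1 else 0) + pvCnt sev fs := by
  rw [show pvCnt sev (f :: fs) = List.foldl
        (fun acc g => if pvSev g = some sev then acc + 1 else acc)
        (if pvSev f = some sev then (0:Int) + 1 else 0) fs from rfl, pvCnt_shift]
  split <;> ring

theorem pvCnt_nonneg (sev : String) (fs : List (List (String × String))) : 0 ≤ pvCnt sev fs := by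
  induction fs with
  | nil => simp [pvCnt]
  | cons f rest ih => rw [pvCnt_cons]; split <;> omega

theorem pvAltLoop_eq (fs : List (List (String × String))) (high medium : Int) :
    pvAltLoop fs high medium =
      if pvCnt "CRITICAL" fs > 0 then "CRITICAL"
      else if high + pvCnt "HIGH" fs > 5 then "HIGH"
      else if high + pvCnt "HIGH" fs > 0 ∨ medium + pvCnt "MEDIUM" fs > 10 then "MEDIUM"
      else "LOW" := by
  induction fs generalizing high medium with
  | nil => simp [pvAltLoop, pvCnt]
  | cons f rest ih =>
      rw [pvCnt_cons "CRITICAL", pvCnt_cons "HIGH", pvCnt_cons "MEDIUM"]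
      have hc := pvCnt_nonneg "CRITICAL" rest
      by_cases h1 : pvSev f = some "CRITICAL"
      · have h2 : ¬ pvSev f = some "HIGH" := by rw [h1]; decide
        have h3 : ¬ pvSev f = some "MEDIUM" := by rw [h1]; decide
        simp only [pvAltLoop, h1, h2, h3, if_pos, if_neg, if_true]
        rw [if_pos (by simp [h1]; omega)]
      · by_cases h2 : pvSev f = some "HIGH"
        · have h3 : ¬ pvSev f = some "MEDIUM" := by rw [h2]; decide
          simp only [pvAltLoop, h1, h2, h3, if_neg, if_pos, if_false, ih]
          rw [show high + 1 + pvCnt "HIGH" rest = high + (1 + pvCnt "HIGH" rest) from by ring]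
          simp
        · by_cases h3 : pvSev f = some "MEDIUM"
          · simp only [pvAltLoop, h1, h2, h3, if_neg, if_pos, if_false, ih]
            rw [show medium + 1 + pvCnt "MEDIUM" rest = medium + (1 + pvCnt "MEDIUM" rest) from by ring]
            simp
          · simp only [pvAltLoop, h1, h2, h3, if_neg, if_false, ih]
            simp [if_neg h1]

-- ===== VERDICT (by name: the statement is the Claim_ definition above) =====
theorem calculate_source_risk_py_spec : Claim_equal_calculate_source_risk_py := by
  intro findings _
  unfold Spec_calculate_source_risk_py calculate_source_risk_py calculate_source_risk_py_alt
  rw [pvAltLoop_eq]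
  simp only [pvCnt]
  norm_num
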